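-- pv_equiv track=rewrite | github.com/heyfastos/Thesis | SUPERVIZR.py | prepare_data_for_BoxWhisker
-- ===== SOURCE A (Python) =====
-- def prepare_data_for_BoxWhisker(input_for_element_class, num_columns):
--     prepared_output = list()
--     row_result = dict()
--     count_rows = 0
--     start = "false"
--     for sub in input_for_element_class:
--         if start == "false":
--             row_result = dict()
--             count_rows = 0
--             start = "true"
--         if count_rows < (num_columns - 1) and start == "true":
--             for key in sub[3]:
--                 if key in row_result:
--                     row_result[key].append(sub[3][key])
--                 else:
--                     row_result[key] = list()
--                     row_result[key].append(sub[3][key])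
--         elif start == "true":
--             # last column
--             for key in sub[3]:
--                 if key in row_result:
--                     row_result[key].append(sub[3][key])
--                 else:
--                     row_result[key] = list()
--                     row_result[key].append(sub[3][key])
--             prepared_output.append(row_result)
--             start = "false"
--         count_rows += 1
--     return prepared_output
-- ===== SOURCE B (Python) =====
-- def prepare_data_for_BoxWhisker(input_for_element_class, num_columns):
--     rows = list(input_for_element_class)
--     size = num_columns if num_columns >= 1 else 1
--     out = []
--     while len(rows) >= size:
--         chunk, rows = rows[:size], rows[size:]
--         agg = {}
--         for sub in chunk:
--             for key, value in sub[3].items():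
--                 agg[key] = agg.get(key, []) + [value]
--         out.append(agg)
--     return out
-- ===== Notes on version B (the rewrite author's own statement) =====
-- stated objective: simpler
-- what changed: A's one-pass state machine with a string flag 'start' and a running row counter is replaced by slicing the row list into consecutive full chunks of size max(num_columns,1) (dropping the trailing partial chunk) and aggregating each chunk's dicts independently.
import Mathlib
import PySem

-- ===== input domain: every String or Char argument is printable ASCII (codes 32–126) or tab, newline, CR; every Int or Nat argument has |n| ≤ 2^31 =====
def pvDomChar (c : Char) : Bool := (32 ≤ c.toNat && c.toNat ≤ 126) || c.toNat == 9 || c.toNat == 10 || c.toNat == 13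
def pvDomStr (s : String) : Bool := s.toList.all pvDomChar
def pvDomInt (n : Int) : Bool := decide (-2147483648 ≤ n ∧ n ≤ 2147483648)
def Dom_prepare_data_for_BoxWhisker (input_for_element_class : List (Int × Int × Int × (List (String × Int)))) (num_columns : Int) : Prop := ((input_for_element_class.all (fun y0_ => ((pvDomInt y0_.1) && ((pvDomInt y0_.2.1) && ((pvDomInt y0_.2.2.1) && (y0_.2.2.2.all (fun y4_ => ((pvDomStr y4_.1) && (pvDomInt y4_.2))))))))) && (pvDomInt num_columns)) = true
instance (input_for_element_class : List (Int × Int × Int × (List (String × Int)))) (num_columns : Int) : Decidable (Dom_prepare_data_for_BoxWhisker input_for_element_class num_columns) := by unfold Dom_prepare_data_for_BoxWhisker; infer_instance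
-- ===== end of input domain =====

-- B replaces A's string-flag/counter state machine by slicing the rows into full chunks of
-- max(num_columns,1) and aggregating each chunk into one dict (objective: simpler decomposition).

-- ===== PORT A =====
-- the inner 'for key in sub[3]' loop of A (sub[3] is a Python dict: PySem.Dict.ofList;
-- iteration is over its keys, sub[3][key] is a lookup that always succeeds, rendered getD _ 0)
def pvAggRowA (r : PySem.Dict String (List Int)) (m : List (String × Int)) : PySem.Dict String (List Int) :=
  let d := PySem.Dict.ofList m
  d.keys.foldl (fun r key =>
    if r.contains key then r.modify key [] (fun l => l ++ [d.getD key 0])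
    else (r.insert key []).modify key [] (fun l => l ++ [d.getD key 0])) r

-- A's main loop: state = (prepared_output, row_result, count_rows, start)
def pvLoopA (nc : Int) :
    List (Int × Int × Int × (List (String × Int))) → List (List (String × List Int)) →
    PySem.Dict String (List Int) → Int → String → List (List (String × List Int))
  | [], out, _, _, _ => out
  | sub :: rest, out, row0, c0, start0 =>
    let row := if start0 = "false" then PySem.Dict.empty else row0
    let c : Int := if start0 = "false" then 0 else c0
    let start := if start0 = "false" then "true" else start0
    if c < nc - 1 ∧ start = "true" then
      pvLoopA nc rest out (pvAggRowA row sub.2.2.2) (c + 1) start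
    else if start = "true" then
      pvLoopA nc rest (out ++ [(pvAggRowA row sub.2.2.2).items]) (pvAggRowA row sub.2.2.2) (c + 1) "false"
    else
      pvLoopA nc rest out row (c + 1) start

def prepare_data_for_BoxWhisker (input_for_element_class : List (Int × Int × Int × (List (String × Int)))) (num_columns : Int) : List (List (String × List Int)) :=
  pvLoopA num_columns input_for_element_class [] PySem.Dict.empty 0 "false"

-- ===== PORT B =====
-- 'agg[key] = agg.get(key, []) + [value]' over the items of each row's dict
def pvAggChunk (chunk : List (Int × Int × Int × (List (String × Int)))) : PySem.Dict String (List Int) :=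
  chunk.foldl (fun agg sub =>
    (PySem.Dict.ofList sub.2.2.2).items.foldl
      (fun agg kv => agg.modify kv.1 [] (fun l => l ++ [kv.2])) agg)
    PySem.Dict.empty

-- B's while loop; rows[:size] / rows[size:] with size ≥ 1 are exactly take/drop
def pvWhileB (n : Nat) (rows : List (Int × Int × Int × (List (String × Int))))
    (out : List (List (String × List Int))) : List (List (String × List Int)) :=
  if _h : 0 < n ∧ n ≤ rows.length then
    pvWhileB n (rows.drop n) (out ++ [(pvAggChunk (rows.take n)).items])
  else out
termination_by rows.length
decreasing_by simp only [List.length_drop]; omega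

def prepare_data_for_BoxWhisker_alt (input_for_element_class : List (Int × Int × Int × (List (String × Int)))) (num_columns : Int) : List (List (String × List Int)) :=
  let size : Int := if num_columns ≥ 1 then num_columns else 1
  pvWhileB size.toNat input_for_element_class []

-- ===== PRECONDITION & SPEC =====
def Spec_prepare_data_for_BoxWhisker (input_for_element_class : List (Int × Int × Int × (List (String × Int)))) (num_columns : Int) (out : List (List (String × List Int))) : Prop := out = prepare_data_for_BoxWhisker_alt input_for_element_class num_columns
instance (input_for_element_class : List (Int × Int × Int × (List (String × Int)))) (num_columns : Int) (out : List (List (String × List Int))) : Decidable (Spec_prepare_data_for_BoxWhisker input_for_element_class num_columns out) := by unfold Spec_prepare_data_for_BoxWhisker; infer_instance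

-- ===== CLAIM (what is proved, stated in full; the proofs are below) =====
def Claim_equal_prepare_data_for_BoxWhisker : Prop := ∀ (input_for_element_class : List (Int × Int × Int × (List (String × Int)))) (num_columns : Int), Dom_prepare_data_for_BoxWhisker input_for_element_class num_columns → Spec_prepare_data_for_BoxWhisker input_for_element_class num_columns (prepare_data_for_BoxWhisker input_for_element_class num_columns)

-- ===== LEMMAS AND PROOFS =====

-- A's two aggregation branches are both 'agg[key] = agg.get(key, []) + [value]'
lemma pv_step_eq (a : PySem.Dict String (List Int)) (key : String) (v : Int) :
    (if a.contains key then a.modify key [] (fun l => l ++ [v])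
     else (a.insert key []).modify key [] (fun l => l ++ [v])) =
    a.modify key [] (fun l => l ++ [v]) := by
  split_ifs with h
  · rfl
  · have h0 : a.contains key = false := by simpa using h
    simp [PySem.Dict.modify, PySem.Dict.getD_insert_self, PySem.Dict.insert_insert_self,
      PySem.Dict.getD_of_not_contains a [] h0]

-- A's keys loop equals B's items loop on one row's dict
lemma pv_aggRow_eq (r : PySem.Dict String (List Int)) (m : List (String × Int)) :
    pvAggRowA r m =
    (PySem.Dict.ofList m).items.foldl
      (fun agg kv => agg.modify kv.1 [] (fun l => l ++ [kv.2])) r := by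
  unfold pvAggRowA
  rw [PySem.Dict.items_eq_map_keys (PySem.Dict.ofList m) (PySem.Dict.nodup_keys_ofList m) 0,
    List.foldl_map]
  simp only [pv_step_eq]

lemma pv_aggChunk_eq (chunk : List (Int × Int × Int × (List (String × Int)))) :
    chunk.foldl (fun r sub => pvAggRowA r sub.2.2.2) PySem.Dict.empty = pvAggChunk chunk := by
  unfold pvAggChunk
  simp only [pv_aggRow_eq]

-- one step of A's loop in the "true" state, the branch test reduced
lemma pvLoopA_cons_true (nc : Int) (sub : Int × Int × Int × (List (String × Int)))
    (rest : List (Int × Int × Int × (List (String × Int))))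
    (out : List (List (String × List Int))) (row : PySem.Dict String (List Int)) (c : Int) :
    pvLoopA nc (sub :: rest) out row c "true" =
      if c < nc - 1 then pvLoopA nc rest out (pvAggRowA row sub.2.2.2) (c + 1) "true"
      else pvLoopA nc rest (out ++ [(pvAggRowA row sub.2.2.2).items])
        (pvAggRowA row sub.2.2.2) (c + 1) "false" := by
  have hne : ¬ (("true" : String) = "false") := by decide
  simp only [pvLoopA, if_neg hne]
  norm_num

-- a "false" step resets row_result and count_rows, then behaves like a "true" step
lemma pvLoopA_cons_false (nc : Int) (sub : Int × Int × Int × (List (String × Int)))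
    (rest : List (Int × Int × Int × (List (String × Int))))
    (out : List (List (String × List Int))) (row : PySem.Dict String (List Int)) (c : Int) :
    pvLoopA nc (sub :: rest) out row c "false" =
      pvLoopA nc (sub :: rest) out PySem.Dict.empty 0 "true" := by
  have hne : ¬ (("true" : String) = "false") := by decide
  simp only [pvLoopA, if_neg hne]
  norm_num

-- A in the mid-group ("true") state consumes exactly m+1 more rows (or drops the partial group)
lemma pvLoopA_true (nc : Int) : ∀ (m : Nat) (rows : List (Int × Int × Int × (List (String × Int))))
    (out : List (List (String × List Int))) (row : PySem.Dict String (List Int)) (c : Int),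
    (∀ j : Nat, (c + j < nc - 1 ↔ (j : Int) < m)) →
    pvLoopA nc rows out row c "true" =
      if rows.length < m + 1 then out
      else pvLoopA nc (rows.drop (m + 1))
        (out ++ [((rows.take (m + 1)).foldl (fun r sub => pvAggRowA r sub.2.2.2) row).items])
        ((rows.take (m + 1)).foldl (fun r sub => pvAggRowA r sub.2.2.2) row)
        (c + m + 1) "false" := by
  intro m
  induction m with
  | zero =>
    intro rows out row c h
    cases rows with
    | nil => simp [pvLoopA]
    | cons sub rest =>
      have hc : ¬ (c < nc - 1) := by
        intro hlt
        have := (h 0).mp (by push_cast; omega)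
        push_cast at this
      rw [pvLoopA_cons_true, if_neg hc, if_neg (by simp)]
      simp
  | succ m ih =>
    intro rows out row c h
    cases rows with
    | nil => simp [pvLoopA]
    | cons sub rest =>
      have hc : c < nc - 1 := by
        have h0 := (h 0).mpr (by push_cast; omega)
        push_cast at h0; omega
      have h' : ∀ j : Nat, (c + 1 + j < nc - 1 ↔ (j : Int) < m) := by
        intro j
        have h2 := h (j + 1)
        push_cast at h2 ⊢
        constructor
        · intro hx; have := h2.mp (by omega); omega
        · intro hx; have := h2.mpr (by omega); omega
      rw [pvLoopA_cons_true, if_pos hc, ih rest out (pvAggRowA row sub.2.2.2) (c + 1) h']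
      have hlen : ((sub :: rest).length < (m + 1) + 1) ↔ (rest.length < m + 1) := by
        simp
      by_cases hr : rest.length < m + 1
      · rw [if_pos hr, if_pos (hlen.mpr hr)]
      · rw [if_neg hr, if_neg (fun hh => hr (hlen.mp hh))]
        simp only [List.drop_succ_cons, List.take_succ_cons, List.foldl_cons]
        congr 1
        push_cast; ring

-- A in the "false" state equals B's while loop, with chunk size n = max(num_columns, 1)
lemma pvLoopA_false (nc : Int) (n : Nat) (hn : n = (if nc ≥ 1 then nc else 1).toNat) :
    ∀ (k : Nat) (rows : List (Int × Int × Int × (List (String × Int))))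
      (out : List (List (String × List Int))) (row : PySem.Dict String (List Int)) (c : Int),
      rows.length ≤ k →
      pvLoopA nc rows out row c "false" = pvWhileB n rows out := by
  have hn1 : 0 < n := by rw [hn]; split_ifs with h <;> omega
  have hm : n = (nc - 1).toNat + 1 := by rw [hn]; split_ifs with h <;> omega
  intro k
  induction k with
  | zero =>
    intro rows out row c hk
    have hnil : rows = [] := by cases rows with | nil => rfl | cons a b => simp at hk
    subst hnil
    rw [pvWhileB, dif_neg (by simp; omega)]
    simp [pvLoopA]
  | succ k ih =>
    intro rows out row c hk
    cases rows with
    | nil =>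
      rw [pvWhileB, dif_neg (by simp; omega)]
      simp [pvLoopA]
    | cons sub rest =>
      rw [pvLoopA_cons_false, pvLoopA_true nc ((nc - 1).toNat) (sub :: rest) out PySem.Dict.empty 0
        (by intro j; constructor
            · intro hx; push_cast at hx ⊢; omega
            · intro hx; push_cast at hx ⊢; omega)]
      rw [pvWhileB]
      have hiff : ((sub :: rest).length < (nc - 1).toNat + 1) ↔ ¬ (0 < n ∧ n ≤ (sub :: rest).length) := by
        constructor
        · intro h hh; omega
        · intro h; by_contra hlt; exact h ⟨hn1, by omega⟩
      by_cases hsmall : (sub :: rest).length < (nc - 1).toNat + 1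
      · rw [if_pos hsmall, dif_neg (hiff.mp hsmall)]
      · have hguard : 0 < n ∧ n ≤ (sub :: rest).length := by
          by_contra hh; exact hsmall (hiff.mpr hh)
        rw [if_neg hsmall, dif_pos hguard]
        rw [← hm, pv_aggChunk_eq]
        exact ih _ _ _ _ (by simp only [List.length_drop]; simp at hk ⊢; omega)

-- ===== VERDICT (by name: the statement is the Claim_ definition above) =====
theorem prepare_data_for_BoxWhisker_spec : Claim_equal_prepare_data_for_BoxWhisker := by
  intro input nc _
  unfold Spec_prepare_data_for_BoxWhisker prepare_data_for_BoxWhisker prepare_data_for_BoxWhisker_alt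
  exact pvLoopA_false nc _ rfl input.length input [] PySem.Dict.empty 0 le_rfl
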